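-- pv_equiv track=rewrite | github.com/Mamvriyskiy/AlgorithmAnalysis | lab_07/main/checktime.py | standart_alg
-- ===== SOURCE A (Python) =====
-- def standart_alg(text, pattern):
--     text_len = len(text)
--     pattern_len = len(pattern)
--
--     comparisons = 0
--     for i in range(text_len - pattern_len + 1):
--         j = 0
--         comparisons += 1
--
--         while j < pattern_len and text[i + j] == pattern[j]:
--             j += 1
--             comparisons += 1
--
--         if j == pattern_len:
--             return comparisons
--
--     return comparisons
-- ===== SOURCE B (Python) =====
-- def _z_array(s):
--     # Z-algorithm: z[i] = length of the longest common prefix of s and s[i:]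
--     length = len(s)
--     z = [0] * length
--     if length > 0:
--         z[0] = length
--     l = r = 0
--     for i in range(1, length):
--         zi = min(r - i, z[i - l]) if i < r else 0
--         while i + zi < length and s[zi] == s[i + zi]:
--             zi += 1
--         z[i] = zi
--         if i + zi > r:
--             l, r = i, i + zi
--     return z
--
--
-- def standart_alg(text, pattern):
--     n, m = len(text), len(pattern)
--     if m == 0:
--         return 1
--     z = _z_array(pattern + text)
--     total = 0
--     for i in range(n - m + 1):
--         k = min(z[m + i], m)
--         total += 1 + k
--         if k == m:
--             break
--     return total
-- ===== Notes on version B (the rewrite author's own statement) =====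
-- stated objective: alternative
-- what changed: B computes the Z-array of pattern+text with the Z-algorithm and derives each position's matched-prefix length as min(z[m+i], m), summing 1+k until the first full match, instead of A's per-window character re-comparison; B's count is worst-case linear but carries Z-array overhead on typical inputs.
import Mathlib
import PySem

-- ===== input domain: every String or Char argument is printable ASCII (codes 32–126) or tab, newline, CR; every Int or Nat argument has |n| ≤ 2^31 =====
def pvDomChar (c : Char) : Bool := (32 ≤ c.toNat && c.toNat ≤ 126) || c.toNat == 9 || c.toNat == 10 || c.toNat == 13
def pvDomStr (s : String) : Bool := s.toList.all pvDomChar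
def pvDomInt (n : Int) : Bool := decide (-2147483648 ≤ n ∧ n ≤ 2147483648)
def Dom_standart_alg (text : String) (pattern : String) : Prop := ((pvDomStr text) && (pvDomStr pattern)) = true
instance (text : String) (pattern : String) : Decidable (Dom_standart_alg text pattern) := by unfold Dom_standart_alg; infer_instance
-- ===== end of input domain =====

-- B replaces A's per-window re-comparison by the Z-algorithm on pattern+text, reading each
-- position's matched-prefix length off the Z-array: a different algorithm, same return value.

-- ===== PORT A =====
-- inner `while j < pattern_len and text[i + j] == pattern[j]` loop; returns (comparisons, j).
-- Indices reached by A are always in range, so comparing the pyGet? options is exact here.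
def pvAWhile (t p : List Char) (pl : Nat) (i : Int) (j : Nat) (c : Int) : Int × Nat :=
  if j < pl ∧ PySem.List.pyGet? t (i + (j : Int)) = PySem.List.pyGet? p (j : Int) then
    pvAWhile t p pl i (j + 1) (c + 1)
  else (c, j)
termination_by pl - j

-- outer `for i in range(...)` with the two return points
def pvALoop (t p : List Char) (pl : Nat) : List Int → Int → Int
  | [], comparisons => comparisons
  | i :: rest, comparisons =>
    let r := pvAWhile t p pl i 0 (comparisons + 1)
    if r.2 = pl then r.1 else pvALoop t p pl rest r.1

def standart_alg (text : String) (pattern : String) : Int :=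
  let t := text.toList
  let p := pattern.toList
  pvALoop t p p.length (PySem.List.pyRange 0 ((t.length : Int) - (p.length : Int) + 1) 1) 0

-- ===== PORT B =====
-- `while i + zi < length and s[zi] == s[i + zi]`: both indices are in range when the guard's
-- bound holds (zi ≤ i + zi), so comparing the getElem? options is exact.
def pvZW (s : List Char) (i : Nat) (zi : Nat) : Nat :=
  if i + zi < s.length ∧ s[zi]? = s[i + zi]? then pvZW s i (zi + 1) else zi
termination_by s.length - (i + zi)

-- body of `for i in range(1, length)` over state (z, l, r); loop indices are ≥ 1 so .toNat is exact
def pvZLoop (s : List Char) : List Int → List Nat × Nat × Nat → List Nat × Nat × Nat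
  | [], st => st
  | ii :: rest, (z, l, r) =>
    let i := ii.toNat
    let start := if i < r then min (r - i) (z.getD (i - l) 0) else 0
    let zi := pvZW s i start
    let z' := z.set i zi
    pvZLoop s rest (if r < i + zi then (z', i, i + zi) else (z', l, r))

-- _z_array(s)
def pvZArr (s : List Char) : List Nat :=
  let z0 := List.replicate s.length 0
  let z1 := if 0 < s.length then z0.set 0 s.length else z0
  (pvZLoop s (PySem.List.pyRange 1 (s.length : Int) 1) (z1, 0, 0)).1

-- second loop: `total += 1 + k; if k == m: break`; loop indices are ≥ 0 so .toNat is exact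
def pvBSum (z : List Nat) (m : Nat) : List Int → Int → Int
  | [], total => total
  | i :: rest, total =>
    let k := min (z.getD (m + i.toNat) 0) m
    let total' := total + 1 + (k : Int)
    if k = m then total' else pvBSum z m rest total'

def standart_alg_alt (text : String) (pattern : String) : Int :=
  let t := text.toList
  let p := pattern.toList
  let n := t.length
  let m := p.length
  if m = 0 then 1
  else
    let z := pvZArr (p ++ t)
    pvBSum z m (PySem.List.pyRange 0 ((n : Int) - (m : Int) + 1) 1) 0

-- ===== PRECONDITION & SPEC =====
def Spec_standart_alg (text : String) (pattern : String) (out : Int) : Prop := out = standart_alg_alt text pattern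
instance (text : String) (pattern : String) (out : Int) : Decidable (Spec_standart_alg text pattern out) := by unfold Spec_standart_alg; infer_instance

-- ===== CLAIM (what is proved, stated in full; the proofs are below) =====
def Claim_equal_standart_alg : Prop := ∀ (text : String) (pattern : String), Dom_standart_alg text pattern → Spec_standart_alg text pattern (standart_alg text pattern)

-- ===== LEMMAS AND PROOFS =====

-- common prefix length of two lists (proof-side notion both programs compute)
def pvCpl : List Char → List Char → Nat
  | a :: as, b :: bs => if a ≠ b then 0 else pvCpl as bs + 1
  | _, _ => 0

-- the true Z-value: longest common prefix of s and s.drop i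
def pvZval (s : List Char) (i : Nat) : Nat := pvCpl s (s.drop i)

theorem pvCpl_cons (a b : Char) (as bs : List Char) :
    pvCpl (a :: as) (b :: bs) = if a = b then pvCpl as bs + 1 else 0 := by
  by_cases h : a = b <;> simp [pvCpl, h]

theorem pvCpl_le_left (p w : List Char) : pvCpl p w ≤ p.length := by
  induction p generalizing w with
  | nil => simp [pvCpl]
  | cons a as ih =>
    cases w with
    | nil => simp [pvCpl]
    | cons b bs =>
      rw [pvCpl_cons]
      have := ih bs
      by_cases h : a = b <;> simp [h] <;> omega

theorem pvCpl_le_right (p w : List Char) : pvCpl p w ≤ w.length := by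
  induction p generalizing w with
  | nil => simp [pvCpl]
  | cons a as ih =>
    cases w with
    | nil => simp [pvCpl]
    | cons b bs =>
      rw [pvCpl_cons]
      have := ih bs
      by_cases h : a = b <;> simp [h] <;> omega

theorem pvCpl_self (s : List Char) : pvCpl s s = s.length := by
  induction s with
  | nil => simp [pvCpl]
  | cons a as ih => simp [pvCpl_cons, ih]

theorem pvCpl_getElem (p w : List Char) (k : Nat) (hk : k < pvCpl p w) : p[k]? = w[k]? := by
  induction p generalizing w k with
  | nil => simp [pvCpl] at hk
  | cons a as ih =>
    cases w with
    | nil => simp [pvCpl] at hk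
    | cons b bs =>
      rw [pvCpl_cons] at hk
      by_cases h : a = b
      · rw [if_pos h] at hk
        cases k with
        | zero => simp [h]
        | succ k' =>
          simp only [List.getElem?_cons_succ]
          exact ih bs k' (by omega)
      · rw [if_neg h] at hk
        omega

theorem pvCpl_ge (p w : List Char) (b : Nat) (hp : b ≤ p.length) (hw : b ≤ w.length)
    (h : ∀ k, k < b → p[k]? = w[k]?) : b ≤ pvCpl p w := by
  induction p generalizing w b with
  | nil => simp at hp; omega
  | cons a as ih =>
    cases b with
    | zero => omega
    | succ b' =>
      cases w with
      | nil => simp at hw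
      | cons c bs =>
        have h0 := h 0 (by omega)
        simp at h0
        rw [pvCpl_cons, if_pos h0]
        have := ih bs b' (by simpa using hp) (by simpa using hw)
          (fun k hk => by
            have := h (k + 1) (by omega)
            simpa using this)
        omega

theorem pvCpl_add (p w : List Char) (k : Nat) (hk : k ≤ pvCpl p w) :
    pvCpl p w = k + pvCpl (p.drop k) (w.drop k) := by
  induction k generalizing p w with
  | zero => simp
  | succ k' ih =>
    cases p with
    | nil => simp [pvCpl] at hk
    | cons a as =>
      cases w with
      | nil => simp [pvCpl] at hk
      | cons b bs =>
        rw [pvCpl_cons] at hk ⊢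
        by_cases h : a = b
        · rw [if_pos h] at hk ⊢
          have := ih as bs (by omega)
          simp only [List.drop_succ_cons]
          omega
        · rw [if_neg h] at hk
          omega

-- head unfolding of pvCpl at offsets
theorem pvCpl_drop_lt {p t : List Char} {j idx : Nat} (hj : j < p.length) (hidx : idx < t.length) :
    pvCpl (p.drop j) (t.drop idx) =
      if p[j] = t[idx] then pvCpl (p.drop (j+1)) (t.drop (idx+1)) + 1 else 0 := by
  rw [List.drop_eq_getElem_cons hj, List.drop_eq_getElem_cons hidx]
  by_cases h : p[j] = t[idx] <;> simp [pvCpl, h]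

theorem pvCpl_append_min (p u w : List Char) :
    min (pvCpl (p ++ u) w) p.length = min (pvCpl p w) p.length := by
  induction p generalizing w with
  | nil => simp [pvCpl]
  | cons a as ih =>
    cases w with
    | nil => simp [pvCpl]
    | cons b bs =>
      by_cases h : a = b
      · simp only [List.cons_append, pvCpl_cons, if_pos h, List.length_cons]
        have := ih bs
        omega
      · simp [pvCpl_cons, h]

-- ===== A-side characterisation (while loop counts the common prefix length) =====
theorem pvAWhile_eq (t p : List Char) (i : Int) (j : Nat) (c : Int)
    (hi : 0 ≤ i) (hlen : i.toNat + p.length ≤ t.length) (hj : j ≤ p.length) :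
    pvAWhile t p p.length i j c =
      (c + (pvCpl (p.drop j) (t.drop (i.toNat + j)) : Int),
       j + pvCpl (p.drop j) (t.drop (i.toNat + j))) := by
  by_cases hjl : j < p.length
  · have hidx : i.toNat + j < t.length := by omega
    have hij : i + (j : Int) = ((i.toNat + j : Nat) : Int) := by omega
    have ht : PySem.List.pyGet? t (i + (j : Int)) = some t[i.toNat + j] := by
      rw [hij, PySem.List.pyGet?_natCast]
      exact List.getElem?_eq_getElem hidx
    have hp : PySem.List.pyGet? p (j : Int) = some p[j] := by
      rw [PySem.List.pyGet?_natCast]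
      exact List.getElem?_eq_getElem hjl
    rw [pvAWhile, pvCpl_drop_lt hjl hidx]
    by_cases heq : p[j] = t[i.toNat + j]
    · rw [if_pos ⟨hjl, by rw [ht, hp, heq]⟩, if_pos heq]
      rw [pvAWhile_eq t p i (j + 1) (c + 1) hi hlen (by omega)]
      have h1 : i.toNat + j + 1 = i.toNat + (j + 1) := by omega
      rw [h1]
      refine Prod.ext ?_ ?_
      · show c + 1 + _ = c + _
        push_cast; ring
      · show j + 1 + _ = j + _
        omega
    · have hcond : ¬ (j < p.length ∧
          PySem.List.pyGet? t (i + (j : Int)) = PySem.List.pyGet? p (j : Int)) := by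
        intro ⟨_, h⟩
        rw [ht, hp] at h
        exact heq (Option.some.inj h).symm
      rw [if_neg hcond, if_neg heq]
      simp
  · have hdrop : p.drop j = [] := by
      apply List.drop_eq_nil_of_le; omega
    rw [pvAWhile]
    simp [hjl, hdrop, pvCpl]
termination_by p.length - j

-- ===== B-side: Z-algorithm correctness =====

-- the extension loop computes zi + the common prefix length of the two remaining suffixes
theorem pvZW_eq (s : List Char) (i zi : Nat) :
    pvZW s i zi = zi + pvCpl (s.drop zi) (s.drop (i + zi)) := by
  by_cases hin : i + zi < s.length
  · have hzi : zi < s.length := by omega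
    rw [pvZW, pvCpl_drop_lt hzi hin]
    by_cases heq : s[zi] = s[i + zi]
    · rw [if_pos ⟨hin, by simp [List.getElem?_eq_getElem, hzi, hin, heq]⟩, if_pos heq]
      rw [pvZW_eq s i (zi + 1)]
      have : i + zi + 1 = i + (zi + 1) := by omega
      rw [this]
      omega
    · have : ¬ (i + zi < s.length ∧ s[zi]? = s[i + zi]?) := by
        intro ⟨_, h⟩
        rw [List.getElem?_eq_getElem hzi, List.getElem?_eq_getElem hin] at h
        exact heq (Option.some.inj h)
      rw [if_neg this, if_neg heq]
      simp
  · have : s.drop (i + zi) = [] := List.drop_eq_nil_of_le (by omega)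
    rw [pvZW]
    have hc : ¬ (i + zi < s.length ∧ s[zi]? = s[i + zi]?) := by
      intro ⟨h, _⟩; omega
    rw [if_neg hc, this]
    cases s.drop zi <;> simp [pvCpl]
termination_by s.length - (i + zi)

-- extending from any correct lower bound reaches the true Z-value
theorem pvZW_correct (s : List Char) (i start : Nat) (h : start ≤ pvZval s i) :
    pvZW s i start = pvZval s i := by
  rw [pvZW_eq]
  have := pvCpl_add s (s.drop i) start h
  rw [List.drop_drop] at this
  unfold pvZval at *
  omega

-- the copied start value min(r - i, z[i-l]) is a valid lower bound inside a Z-box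
theorem pvStart_le (s : List Char) (l r i : Nat) (hl : 1 ≤ l) (hli : l < i) (hir : i < r)
    (hr : r = l + pvZval s l) :
    min (r - i) (pvZval s (i - l)) ≤ pvZval s i := by
  set b := min (r - i) (pvZval s (i - l)) with hb
  have hrL : r ≤ s.length := by
    have := pvCpl_le_right s (s.drop l)
    simp only [List.length_drop] at this
    unfold pvZval at hr
    omega
  apply pvCpl_ge
  · omega
  · simp only [List.length_drop]; omega
  · intro k hk
    have h1 : s[k]? = s[(i - l) + k]? := by
      have := pvCpl_getElem s (s.drop (i - l)) k (by unfold pvZval at hb; omega)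
      rwa [List.getElem?_drop] at this
    have h2 : s[(i - l) + k]? = s[i + k]? := by
      have hx : (i - l) + k < pvZval s l := by omega
      have := pvCpl_getElem s (s.drop l) ((i - l) + k) (by unfold pvZval at hx; omega)
      rw [List.getElem?_drop] at this
      have harith : l + ((i - l) + k) = i + k := by omega
      rw [harith] at this
      exact this
    rw [List.getElem?_drop]
    exact h1.trans h2

-- invariant of the main Z loop: processed entries hold true Z-values, (l, r) is a valid Z-box
theorem pvZLoop_correct (s : List Char) (i : Nat) (z : List Nat) (l r : Nat)
    (hi : 1 ≤ i) (hlen : z.length = s.length)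
    (hz : ∀ j, j < i → j < s.length → z.getD j 0 = pvZval s j)
    (hbox : (l = 0 ∧ r = 0) ∨ (1 ≤ l ∧ l < i ∧ r = l + pvZval s l)) :
    ∀ j, j < s.length →
      ((pvZLoop s (PySem.List.pyRange (i : Int) (s.length : Int) 1) (z, l, r)).1).getD j 0
        = pvZval s j := by
  by_cases hiL : i < s.length
  · rw [PySem.List.pyRange_one_cons (by omega)]
    simp only [pvZLoop]
    have htn : ((i : Int)).toNat = i := by omega
    rw [htn]
    -- the start value is a valid lower bound on the true Z-value
    have hstart : (if i < r then min (r - i) (z.getD (i - l) 0) else 0) ≤ pvZval s i := by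
      by_cases hir : i < r
      · rcases hbox with ⟨_, hr0⟩ | ⟨hl1, hli, hr⟩
        · omega
        · rw [if_pos hir]
          have hjl : i - l < i := by omega
          have hjL : i - l < s.length := by omega
          rw [hz (i - l) hjl hjL]
          exact pvStart_le s l r i hl1 hli hir hr
      · simp [hir]
    have hzw : pvZW s i (if i < r then min (r - i) (z.getD (i - l) 0) else 0) = pvZval s i :=
      pvZW_correct s i _ hstart
    rw [hzw]
    -- updated array entries
    have hlen' : (z.set i (pvZval s i)).length = s.length := by simp [hlen]
    have hz' : ∀ j, j < i + 1 → j < s.length → (z.set i (pvZval s i)).getD j 0 = pvZval s j := by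
      intro j hj hjL
      by_cases hji : j = i
      · subst hji
        simp [List.getD, List.getElem?_set_self (by omega : j < z.length)]
      · rw [List.getD, List.getElem?_set_ne (by omega)]
        exact hz j (by omega) hjL
    by_cases hupd : r < i + pvZval s i
    · rw [if_pos hupd]
      have := pvZLoop_correct s (i + 1) (z.set i (pvZval s i)) i (i + pvZval s i)
        (by omega) hlen' hz' (Or.inr ⟨by omega, by omega, rfl⟩)
      have hpush : ((i : Int) + 1) = ((i + 1 : Nat) : Int) := by push_cast; ring
      rw [← hpush] at this
      exact this
    · rw [if_neg hupd]
      have hbox' : (l = 0 ∧ r = 0) ∨ (1 ≤ l ∧ l < i + 1 ∧ r = l + pvZval s l) := by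
        rcases hbox with h | ⟨a, b, c⟩
        · exact Or.inl h
        · exact Or.inr ⟨a, by omega, c⟩
      have := pvZLoop_correct s (i + 1) (z.set i (pvZval s i)) l r
        (by omega) hlen' hz' hbox'
      have hpush : ((i : Int) + 1) = ((i + 1 : Nat) : Int) := by push_cast; ring
      rw [← hpush] at this
      exact this
  · have : PySem.List.pyRange (i : Int) (s.length : Int) 1 = [] := by
      rw [PySem.List.pyRange_one]
      have : ((s.length : Int) - (i : Int)).toNat = 0 := by omega
      simp [this]
    rw [this]
    intro j hj
    exact hz j (by omega) hj
termination_by s.length - i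
decreasing_by all_goals omega

theorem pvZArr_correct (s : List Char) (j : Nat) (hj : j < s.length) :
    (pvZArr s).getD j 0 = pvZval s j := by
  have hL : 0 < s.length := by omega
  unfold pvZArr
  simp only [if_pos hL]
  apply pvZLoop_correct s 1 _ 0 0 (le_refl 1)
  · simp
  · intro j' hj' hj'L
    have : j' = 0 := by omega
    subst this
    rw [List.getD, List.getElem?_set_self (by simpa using hL)]
    simp [pvZval, pvCpl_self]
  · exact Or.inl ⟨rfl, rfl⟩
  · exact hj

-- reading min(z[m+i], m) recovers the matched-prefix length of pattern against the window at i
theorem pvZ_window (p t : List Char) (i : Nat) (hm : 1 ≤ p.length) (hi : i + p.length ≤ t.length) :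
    min ((pvZArr (p ++ t)).getD (p.length + i) 0) p.length = pvCpl p (t.drop i) := by
  have hlt : p.length + i < (p ++ t).length := by
    simp only [List.length_append]; omega
  have hcplle : pvCpl p (t.drop i) ≤ p.length := pvCpl_le_left _ _
  rw [pvZArr_correct _ _ hlt]
  unfold pvZval
  have hdrop : (p ++ t).drop (p.length + i) = t.drop i := by
    rw [List.drop_append]
    have h1 : List.drop (p.length + i) p = [] := List.drop_eq_nil_of_le (by omega)
    have h2 : p.length + i - p.length = i := by omega
    rw [h1, h2, List.nil_append]
  rw [hdrop]
  have h1 : min (pvCpl (p ++ t) (t.drop i)) p.length = min (pvCpl p (t.drop i)) p.length :=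
    pvCpl_append_min p t (t.drop i)
  omega

-- A's outer loop equals B's summation loop on the shared index range
theorem pvLoops_eq (t p : List Char) (z : List Nat)
    (hz : ∀ k : Nat, k + p.length ≤ t.length →
        min (z.getD (p.length + k) 0) p.length = pvCpl p (t.drop k))
    (l : List Int) (acc : Int)
    (hl : ∀ i ∈ l, 0 ≤ i ∧ i.toNat + p.length ≤ t.length) :
    pvALoop t p p.length l acc = pvBSum z p.length l acc := by
  induction l generalizing acc with
  | nil => rfl
  | cons i rest ih =>
    obtain ⟨hi, hlen⟩ := hl i (by simp)
    have hw := pvAWhile_eq t p i 0 (acc + 1) hi hlen (by omega)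
    have hk := hz i.toNat hlen
    rw [pvALoop, pvBSum, hw]
    simp only [List.drop_zero, Nat.add_zero, Nat.zero_add, hk]
    by_cases hfull : pvCpl p (t.drop i.toNat) = p.length
    · rw [if_pos hfull, if_pos hfull]
    · rw [if_neg hfull, if_neg hfull]
      rw [ih _ (fun x hx => hl x (by simp [hx]))]

-- the empty pattern: A returns 1 at the very first position
theorem standart_alg_empty (t : List Char) :
    pvALoop t [] 0 (PySem.List.pyRange 0 ((t.length : Int) - 0 + 1) 1) 0 = 1 := by
  rw [PySem.List.pyRange_one_cons (by omega)]
  rw [pvALoop, pvAWhile]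
  simp

-- ===== VERDICT (by name: the statement is the Claim_ definition above) =====
theorem standart_alg_spec : Claim_equal_standart_alg := by
  intro text pattern _
  unfold Spec_standart_alg standart_alg standart_alg_alt
  set t := text.toList
  set p := pattern.toList
  by_cases hm : p.length = 0
  · have hp : p = [] := List.eq_nil_of_length_eq_zero hm
    rw [if_pos hm, hp]
    simpa using standart_alg_empty t
  · rw [if_neg hm]
    apply pvLoops_eq t p _
    · intro k hk
      exact pvZ_window p t k (by omega) hk
    · intro i hi
      rw [PySem.List.mem_pyRange_one] at hi
      omega
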